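-- pv_equiv track=rewrite | github.com/punisher21maximum/MyDSAVault | Heap/Min Heap/tempPass.py | minPotsToRemove
-- ===== SOURCE A (Python) =====
-- def minPotsToRemove(N, a):
--     if N == 0:
--         return 0
--     if N == 1:
--         return 0
--
--     result = 0
--
--     for i in range(1, N):
--         if a[i] > a[i-1]:
--             extraPots = a[i] - a[i-1]
--             a[i] -= extraPots
--             result += extraPots
--
--     return result
-- ===== SOURCE B (Python) =====
-- def minPotsToRemove(N, a):
--     # Characterisation: after A's clamping, element i holds the prefix minimum
--     # of a[0..i], so the answer is sum(a[:N]) minus the sum of prefix minima.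
--     # (A also mutates a in place; B does not - return value only.)
--     if N <= 1:
--         return 0
--     pref = a[:N]
--     mins = []
--     m = None
--     for x in pref:
--         m = x if m is None else min(m, x)
--         mins.append(m)
--     return sum(pref) - sum(mins)
-- ===== Notes on version B (the rewrite author's own statement) =====
-- stated objective: alternative
-- what changed: B abandons A's in-place clamp-and-accumulate pass entirely: it characterises A's result as sum(a[:N]) minus the sum of the running prefix minima of a[:N], building the prefix-minima list with min() and taking a sum difference, with no conditional clamping, no mutation and no removal accumulator.
import Mathlib
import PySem

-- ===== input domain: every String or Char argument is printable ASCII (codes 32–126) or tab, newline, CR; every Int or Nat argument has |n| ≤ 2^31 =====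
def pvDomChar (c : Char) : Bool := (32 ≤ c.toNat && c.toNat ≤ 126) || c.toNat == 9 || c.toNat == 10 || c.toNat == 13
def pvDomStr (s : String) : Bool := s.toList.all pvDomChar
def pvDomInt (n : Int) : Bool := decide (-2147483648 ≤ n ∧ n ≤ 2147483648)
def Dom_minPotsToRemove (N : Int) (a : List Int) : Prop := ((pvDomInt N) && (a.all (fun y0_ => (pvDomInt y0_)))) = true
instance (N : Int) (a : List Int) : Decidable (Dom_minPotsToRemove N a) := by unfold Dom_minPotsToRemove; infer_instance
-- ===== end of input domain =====

-- B replaces A's in-place clamp-and-accumulate pass by a characterisation of the result: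
-- sum(a[:N]) minus the sum of the running prefix minima of a[:N] (objective: alternative).
-- A mutates `a` in place, B does not; the equivalence proved here is about the RETURN value only.

-- ===== PORT A =====
-- one iteration of A's loop body, state = (a, result)
def pvStepA (st : List Int × Int) (i : Int) : List Int × Int :=
  match PySem.List.pyGet? st.1 i, PySem.List.pyGet? st.1 (i - 1) with
  | some ai, some aim =>
      if ai > aim then
        let extraPots := ai - aim
        (PySem.List.pySetD st.1 i (ai - extraPots), st.2 + extraPots)
      else st
  | _, _ => st  -- IndexError: excluded by Pre_

def minPotsToRemove (N : Int) (a : List Int) : Int :=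
  if N = 0 then 0
  else if N = 1 then 0
  else ((PySem.List.pyRange 1 N 1).foldl pvStepA (a, 0)).2

-- ===== PORT B =====
-- one iteration of B's prefix-minima loop body, state = (m, mins)
def pvMinsStep (st : Option Int × List Int) (x : Int) : Option Int × List Int :=
  let m := match st.1 with | none => x | some p => min p x
  (some m, st.2 ++ [m])

def minPotsToRemove_alt (N : Int) (a : List Int) : Int :=
  if N ≤ 1 then 0
  else
    let pref := PySem.List.slice a none (some N)
    let mins := (pref.foldl pvMinsStep (none, [])).2
    pref.sum - mins.sum

-- ===== PRECONDITION & SPEC =====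
-- Pre_ excludes exactly the inputs on which Python A raises IndexError: N ≥ 2 with fewer than N elements.
def Pre_minPotsToRemove (N : Int) (a : List Int) : Prop := N ≤ 1 ∨ N ≤ (a.length : Int)
instance (N : Int) (a : List Int) : Decidable (Pre_minPotsToRemove N a) := by unfold Pre_minPotsToRemove; infer_instance
def pvWitness_minPotsToRemove : Int × List Int := (3, [5, 3, 4])

def Spec_minPotsToRemove (N : Int) (a : List Int) (out : Int) : Prop := out = minPotsToRemove_alt N a
instance (N : Int) (a : List Int) (out : Int) : Decidable (Spec_minPotsToRemove N a out) := by unfold Spec_minPotsToRemove; infer_instance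

-- ===== CLAIM (what is proved, stated in full; the proofs are below) =====
def Claim_equal_minPotsToRemove : Prop := ∀ (N : Int) (a : List Int), Dom_minPotsToRemove N a → Pre_minPotsToRemove N a → Spec_minPotsToRemove N a (minPotsToRemove N a)

-- ===== LEMMAS AND PROOFS =====

-- proof-only model of A's loop acting on the list alone (clamping, no accumulator)
def pvStepB (l : List Int) (i : Int) : List Int :=
  match PySem.List.pyGet? l i, PySem.List.pyGet? l (i - 1) with
  | some ai, some aim => if ai > aim then PySem.List.pySetD l i aim else l
  | _, _ => l

-- running prefix minima, starting from current minimum m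
def pmGo (m : Int) : List Int → List Int
  | [] => []
  | x :: xs => min m x :: pmGo (min m x) xs

-- prefix minima of a whole list
def pmFull : List Int → List Int
  | [] => []
  | x :: xs => x :: pmGo x xs

theorem pv_sum_set (l : List Int) (n : Nat) (v : Int) (h : n < l.length) :
    (l.set n v).sum = l.sum - l[n] + v := by
  induction l generalizing n with
  | nil => simp at h
  | cons x xs ih =>
    cases n with
    | zero => simp [List.set]; ring
    | succ m =>
      simp only [List.set, List.sum_cons, List.getElem_cons_succ]
      rw [ih m (by simpa using h)]
      ring

-- A's fold = the clamping fold plus the drop in the list's sum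
theorem pv_fold_inv (idxs : List Int) (l : List Int) (r : Int)
    (hpos : ∀ i ∈ idxs, 1 ≤ i) :
    (idxs.foldl pvStepA (l, r)).1 = idxs.foldl pvStepB l ∧
    (idxs.foldl pvStepA (l, r)).2 + (idxs.foldl pvStepB l).sum = r + l.sum := by
  induction idxs generalizing l r with
  | nil => simp
  | cons i rest ih =>
    have hi : 1 ≤ i := hpos i (by simp)
    have hrest : ∀ j ∈ rest, 1 ≤ j := fun j hj => hpos j (by simp [hj])
    simp only [List.foldl_cons]
    have hstep : pvStepA (l, r) i = (pvStepB l i, r + (l.sum - (pvStepB l i).sum)) := by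
      unfold pvStepA pvStepB
      cases hget : PySem.List.pyGet? l i with
      | none => simp
      | some ai =>
        cases hget' : PySem.List.pyGet? l (i - 1) with
        | none => simp
        | some aim =>
          simp only []
          by_cases hgt : ai > aim
          · have h0i : 0 ≤ i := by omega
            have hidx : i.toNat < l.length ∧ l[i.toNat]? = some ai := by
              rw [PySem.List.pyGet?_of_nonneg l h0i] at hget
              exact ⟨(List.getElem?_eq_some_iff.mp hget).1, hget⟩
            have hgetel : l[i.toNat]'hidx.1 = ai := by
              have := hidx.2; simp [List.getElem?_eq_some_iff] at this; exact this.2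
            have hsum : (l.set i.toNat aim).sum = l.sum - ai + aim := by
              rw [pv_sum_set l i.toNat aim hidx.1, hgetel]
            simp only [if_pos hgt, PySem.List.pySetD_of_nonneg l _ h0i]
            have : ai - (ai - aim) = aim := by ring
            rw [this]
            refine Prod.ext rfl ?_
            simp only [hsum]; ring
          · simp [if_neg hgt]
    rw [hstep]
    obtain ⟨h1, h2⟩ := ih (pvStepB l i) (r + (l.sum - (pvStepB l i).sum)) hrest
    exact ⟨h1, by rw [h2]; ring⟩

theorem pmGo_length (m : Int) (xs : List Int) : (pmGo m xs).length = xs.length := by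
  induction xs generalizing m with
  | nil => rfl
  | cons x xs ih => simp [pmGo, ih]

theorem pmGo_append_singleton (m : Int) (xs : List Int) (y : Int) :
    pmGo m (xs ++ [y]) = pmGo m xs ++ [min (xs.foldl min m) y] := by
  induction xs generalizing m with
  | nil => simp [pmGo]
  | cons x xs ih => simp [pmGo, ih]

theorem pmGo_getLast (m : Int) (xs : List Int) (h : xs ≠ []) :
    (pmGo m xs)[xs.length - 1]? = some (xs.foldl min m) := by
  induction xs generalizing m with
  | nil => exact absurd rfl h
  | cons x xs ih =>
    cases xs with
    | nil => simp [pmGo]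
    | cons y ys =>
      have := ih (min m x) (by simp)
      simpa [pmGo, List.foldl_cons] using this

-- B's mins fold computes pmGo
theorem pv_mins_go (xs : List Int) (m : Int) (acc : List Int) :
    (xs.foldl pvMinsStep (some m, acc)).2 = acc ++ pmGo m xs := by
  induction xs generalizing m acc with
  | nil => simp [pmGo]
  | cons x xs ih => simp [pvMinsStep, pmGo, ih]

theorem pv_mins (x : Int) (xs : List Int) :
    (((x :: xs).foldl pvMinsStep (none, [])).2) = pmFull (x :: xs) := by
  simp [pvMinsStep, pmFull, pv_mins_go]

theorem pmFull_length (l : List Int) : (pmFull l).length = l.length := by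
  cases l with
  | nil => rfl
  | cons x xs => simp [pmFull, pmGo_length]

-- the overall minimum a non-empty list's prefix minima end with
def pmAll : List Int → Int
  | [] => 0
  | x :: xs => xs.foldl min x

theorem pmFull_getLast (l : List Int) (h : l ≠ []) :
    (pmFull l)[l.length - 1]? = some (pmAll l) := by
  cases l with
  | nil => exact absurd rfl h
  | cons x xs =>
    cases hxs : xs with
    | nil => simp [pmFull, pmGo, pmAll]
    | cons y ys =>
      have hlen : xs.length = (xs.length - 1) + 1 := by subst hxs; simp
      have : (x :: pmGo x xs)[xs.length]? = (pmGo x xs)[xs.length - 1]? := by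
        rw [hlen]; simp
      rw [← hxs]
      simp only [pmFull, pmAll, List.length_cons, Nat.add_sub_cancel]
      rw [this, pmGo_getLast x xs (by simp [hxs])]

theorem pmFull_append_singleton (l : List Int) (y : Int) (h : l ≠ []) :
    pmFull (l ++ [y]) = pmFull l ++ [min (pmAll l) y] := by
  cases l with
  | nil => exact absurd rfl h
  | cons x xs => simp [pmFull, pmAll, pmGo_append_singleton]

-- pvStepB when both reads succeed
theorem pvStepB_eq (l : List Int) (i : Int) (ai aim : Int)
    (h1 : PySem.List.pyGet? l i = some ai) (h2 : PySem.List.pyGet? l (i - 1) = some aim) :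
    pvStepB l i = if ai > aim then PySem.List.pySetD l i aim else l := by
  unfold pvStepB
  rw [h1, h2]

-- the clamping fold produces the prefix minima of the first k elements
theorem pv_clamp_char (a : List Int) (k : Nat) (h1 : 1 ≤ k) (h2 : k ≤ a.length) :
    (PySem.List.pyRange 1 (k : Int) 1).foldl pvStepB a = pmFull (a.take k) ++ a.drop k := by
  induction k, h1 using Nat.le_induction with
  | base =>
    simp only [Nat.cast_one]
    rw [PySem.List.pyRange_one_eq_nil (by omega : (1:Int) ≤ 1)]
    cases a with
    | nil => simp at h2
    | cons x xs => simp [pmFull, pmGo]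
  | succ k hk ih =>
    have hklen : k < a.length := by omega
    have hih := ih (by omega)
    have hcast : ((k + 1 : Nat) : Int) = (k : Int) + 1 := by push_cast; ring
    rw [hcast, PySem.List.pyRange_one_succ_right (by exact_mod_cast hk), List.foldl_append]
    rw [hih]
    set tk := a.take k with htk
    have htknil : tk ≠ [] := by
      have : tk.length = k := by simp [htk]; omega
      intro hcon; rw [hcon] at this; simp at this; omega
    have hlenpm : (pmFull tk).length = k := by
      rw [pmFull_length]; simp [htk]; omega
    have hdrop : a.drop k = a[k] :: a.drop (k + 1) := List.drop_eq_getElem_cons hklen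
    set m := pmAll tk with hm
    -- the two reads A's loop body performs
    have hga : PySem.List.pyGet? (pmFull tk ++ a.drop k) (k : Int) = some a[k] := by
      conv_lhs => rw [hdrop]
      have := PySem.List.pyGet?_append_length (pmFull tk) (a.drop (k + 1)) a[k]
      rwa [hlenpm] at this
    have hgm : PySem.List.pyGet? (pmFull tk ++ a.drop k) ((k : Int) - 1) = some m := by
      have hc : (k : Int) - 1 = ((k - 1 : Nat) : Int) := by omega
      rw [hc, PySem.List.pyGet?_natCast]
      rw [List.getElem?_append_left (by omega : k - 1 < (pmFull tk).length)]
      have : tk.length = k := by simp [htk]; omega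
      rw [← this, pmFull_getLast tk htknil]
    -- the new prefix: take (k+1) and its prefix minima
    have htake : a.take (k + 1) = tk ++ [a[k]] := by
      rw [List.take_add_one]; simp [htk, List.getElem?_eq_getElem hklen]
    have hpm : pmFull (a.take (k + 1)) = pmFull tk ++ [min m a[k]] := by
      rw [htake, pmFull_append_singleton tk _ htknil]
    simp only [List.foldl_cons, List.foldl_nil]
    rw [pvStepB_eq _ _ _ _ hga hgm]
    by_cases hgt : a[k] > m
    · rw [if_pos hgt]
      rw [PySem.List.pySetD_natCast]
      rw [hdrop, List.set_append]
      rw [if_neg (by omega : ¬ k < (pmFull tk).length)]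
      rw [hlenpm]
      simp only [Nat.sub_self, List.set_cons_zero]
      rw [hpm, min_eq_left (le_of_lt hgt)]
      simp
    · rw [if_neg hgt]
      rw [hpm, min_eq_right (by omega : a[k] ≤ m)]
      rw [hdrop]
      simp

-- ===== VERDICT (by name: the statement is the Claim_ definition above) =====
theorem minPotsToRemove_spec : Claim_equal_minPotsToRemove := by
  intro N a _ hpre
  unfold Spec_minPotsToRemove minPotsToRemove minPotsToRemove_alt
  by_cases hN : N ≤ 1
  · rw [if_pos hN]
    by_cases h0 : N = 0
    · rw [if_pos h0]
    · rw [if_neg h0]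
      by_cases h1' : N = 1
      · rw [if_pos h1']
      · rw [if_neg h1']
        rw [PySem.List.pyRange_one_eq_nil (by omega : N ≤ 1)]
        simp
  · rw [if_neg hN]
    have h2N : 2 ≤ N := by omega
    have hlen : N ≤ (a.length : Int) := by
      rcases hpre with h | h
      · omega
      · exact h
    set k := N.toNat with hkdef
    have hNk : (k : Int) = N := by omega
    have hk1 : 1 ≤ k := by omega
    have hklen : k ≤ a.length := by omega
    rw [if_neg (by omega : ¬ N = 0), if_neg (by omega : ¬ N = 1)]
    have hpos : ∀ i ∈ PySem.List.pyRange 1 N 1, 1 ≤ i := by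
      intro i hi
      exact (PySem.List.mem_pyRange_one.mp hi).1
    obtain ⟨h1, h2⟩ := pv_fold_inv (PySem.List.pyRange 1 N 1) a 0 hpos
    have hclamp : (PySem.List.pyRange 1 N 1).foldl pvStepB a = pmFull (a.take k) ++ a.drop k := by
      rw [← hNk]; exact pv_clamp_char a k hk1 hklen
    rw [hclamp] at h2
    have hslice : PySem.List.slice a none (some N) = a.take k := by
      rw [PySem.List.slice_to a (by omega : (0:Int) ≤ N)]
    rw [hslice]
    dsimp only
    have hmins : ((a.take k).foldl pvMinsStep (none, [])).2 = pmFull (a.take k) := by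
      obtain ⟨x, xs, htk⟩ : ∃ x xs, a.take k = x :: xs := by
        have hlt : (a.take k).length = k := by simp; omega
        cases htk2 : a.take k with
        | nil => rw [htk2] at hlt; simp at hlt; omega
        | cons x xs => exact ⟨x, xs, rfl⟩
      rw [htk, pv_mins, ← htk]
    rw [hmins]
    have hsplit : (a.take k).sum + (a.drop k).sum = a.sum := List.sum_take_add_sum_drop a k
    rw [List.sum_append] at h2
    omega
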